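-- pv_equiv track=rewrite | github.com/danrsc/bert_brain_neurips_2019 | bert_brain/data_sets/spacy_token_meta.py | group_word_pieces
-- ===== SOURCE A (Python) =====
-- def group_word_pieces(bert_tokens):
--     group = list()
--     for t in bert_tokens:
--         s = t
--         if isinstance(t, tuple):  # unk
--             s = t[0]
--         if not s.startswith('##'):
--             if len(group) > 0:
--                 yield group
--             group = list()
--         group.append(t)
--     if len(group) > 0:
--         yield group
-- ===== SOURCE B (Python) =====
-- def _unwrap(t):
--     return t[0] if isinstance(t, tuple) else t
--
--
-- def group_word_pieces(bert_tokens):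
--     toks = list(bert_tokens)
--     n = len(toks)
--     i = 0
--     while i < n:
--         j = i + 1
--         while j < n and _unwrap(toks[j]).startswith('##'):
--             j += 1
--         yield toks[i:j]
--         i = j
-- ===== Notes on version B (the rewrite author's own statement) =====
-- stated objective: alternative
-- what changed: Replaces A's accumulator-driven fold (open group carried between iterations, flushed on each word start and at the end) with a two-pointer scan: for each word start i, advance j past the following '##' continuation pieces and emit the slice toks[i:j].
import Mathlib
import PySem

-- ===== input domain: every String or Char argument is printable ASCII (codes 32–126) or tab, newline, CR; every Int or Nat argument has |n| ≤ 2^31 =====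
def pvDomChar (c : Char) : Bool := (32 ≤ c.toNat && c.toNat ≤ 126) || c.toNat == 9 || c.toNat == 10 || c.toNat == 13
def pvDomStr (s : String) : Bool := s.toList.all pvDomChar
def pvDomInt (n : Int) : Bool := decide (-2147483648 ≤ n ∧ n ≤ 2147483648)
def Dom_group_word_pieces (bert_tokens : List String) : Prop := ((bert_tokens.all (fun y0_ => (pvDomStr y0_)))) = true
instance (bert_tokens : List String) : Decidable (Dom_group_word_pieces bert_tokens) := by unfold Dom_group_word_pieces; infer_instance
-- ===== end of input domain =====

-- B replaces A's accumulator fold (open group flushed at each word start) by a two-pointer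
-- scan emitting each slice toks[i:j] directly; same algorithmic cost, different decomposition.

-- ===== PORT A =====
-- A's generator: fold over the tokens carrying (yielded groups so far, current open group);
-- the tuple-unk unwrap is the identity here since tokens are Strings.
def pvStepA (acc : List (List String) × List String) (t : String) :
    List (List String) × List String :=
  if ¬ PySem.Str.startswith t "##" then
    ((if acc.2.length > 0 then acc.1 ++ [acc.2] else acc.1), [t])
  else
    (acc.1, acc.2 ++ [t])

def group_word_pieces (bert_tokens : List String) : List (List String) :=
  let st := bert_tokens.foldl pvStepA ([], [])
  if st.2.length > 0 then st.1 ++ [st.2] else st.1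

-- ===== PORT B =====
-- inner while loop of B: advance j while j < n and toks[j] starts with '##' (short-circuit 'and' = nested ifs)
def pvScan (toks : List String) (j : Nat) : Nat :=
  if h : j < toks.length then
    if PySem.Str.startswith toks[j] "##" then pvScan toks (j + 1) else j
  else j
termination_by toks.length - j
decreasing_by omega

theorem pvScan_gt (toks : List String) (j : Nat) : j < pvScan toks j + 1 := by
  unfold pvScan
  split
  · split
    · have := pvScan_gt toks (j + 1); omega
    · omega
  · omega
termination_by toks.length - j
decreasing_by rename_i h _; omega

-- outer while loop of B: i is the start of the current word, j the start of the next
def pvGo (toks : List String) (i : Nat) : List (List String) :=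
  if h : i < toks.length then
    PySem.List.slice toks (some (i : Int)) (some ((pvScan toks (i + 1) : Nat) : Int))
      :: pvGo toks (pvScan toks (i + 1))
  else []
termination_by toks.length - i
decreasing_by have := pvScan_gt toks (i + 1); omega

def group_word_pieces_alt (bert_tokens : List String) : List (List String) :=
  pvGo bert_tokens 0

-- ===== PRECONDITION & SPEC =====
def Spec_group_word_pieces (bert_tokens : List String) (out : List (List String)) : Prop := out = group_word_pieces_alt bert_tokens
instance (bert_tokens : List String) (out : List (List String)) : Decidable (Spec_group_word_pieces bert_tokens out) := by unfold Spec_group_word_pieces; infer_instance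

-- ===== CLAIM (what is proved, stated in full; the proofs are below) =====
def Claim_equal_group_word_pieces : Prop := ∀ (bert_tokens : List String), Dom_group_word_pieces bert_tokens → Spec_group_word_pieces bert_tokens (group_word_pieces bert_tokens)

-- ===== LEMMAS AND PROOFS =====

-- common reference form: structural recursion pairing a head with its '##' continuation run
def pvGW : List String → List (List String)
  | [] => []
  | t :: r =>
    (t :: r.takeWhile (fun s => PySem.Str.startswith s "##"))
      :: pvGW (r.dropWhile (fun s => PySem.Str.startswith s "##"))
termination_by l => l.length
decreasing_by
  simpa using Nat.lt_succ_of_le (List.length_dropWhile_le _ _)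

theorem pv_take_length_takeWhile {α : Type} (p : α → Bool) (l : List α) :
    l.take (l.takeWhile p).length = l.takeWhile p := by
  induction l with
  | nil => rfl
  | cons a l ih =>
    rw [List.takeWhile_cons]
    by_cases hp : p a = true <;> simp [hp, ih]

theorem pv_drop_length_takeWhile {α : Type} (p : α → Bool) (l : List α) :
    l.drop (l.takeWhile p).length = l.dropWhile p := by
  induction l with
  | nil => rfl
  | cons a l ih =>
    rw [List.takeWhile_cons, List.dropWhile_cons]
    by_cases hp : p a = true <;> simp [hp, ih]

theorem pvScan_eq (toks : List String) (j : Nat) :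
    pvScan toks j =
      j + ((toks.drop j).takeWhile (fun s => PySem.Str.startswith s "##")).length := by
  unfold pvScan
  split
  · rename_i hj
    rw [List.drop_eq_getElem_cons hj, List.takeWhile_cons]
    split
    · rename_i hs
      rw [pvScan_eq toks (j + 1)]
      simp
      omega
    · rename_i hs
      simp
  · rename_i hj
    rw [List.drop_eq_nil_of_le (by omega)]
    simp
termination_by toks.length - j
decreasing_by rename_i h _; omega

theorem pvGo_eq (toks : List String) (i : Nat) :
    pvGo toks i = pvGW (toks.drop i) := by
  unfold pvGo
  split
  · rename_i h
    rw [pvGo_eq toks (pvScan toks (i + 1))]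
    rw [pvScan_eq toks (i + 1)]
    rw [List.drop_eq_getElem_cons h, pvGW]
    congr 1
    · rw [PySem.List.slice_natCast]
      rw [List.drop_eq_getElem_cons h]
      rw [show i + 1 + ((toks.drop (i+1)).takeWhile (fun s => PySem.Str.startswith s "##")).length - i
            = ((toks.drop (i+1)).takeWhile (fun s => PySem.Str.startswith s "##")).length + 1 by omega]
      rw [List.take_succ_cons]
      rw [pv_take_length_takeWhile]
    · have hdd : List.drop (i + 1 + ((toks.drop (i+1)).takeWhile (fun s => PySem.Str.startswith s "##")).length) toks
            = List.drop ((((toks.drop (i+1)).takeWhile (fun s => PySem.Str.startswith s "##")).length)) (List.drop (i+1) toks) := by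
        rw [List.drop_drop]
      rw [hdd, pv_drop_length_takeWhile]
  · rename_i h
    rw [List.drop_eq_nil_of_le (by omega), pvGW]
termination_by toks.length - i
decreasing_by have := pvScan_gt toks (i + 1); omega

-- A's finalize step: flush the open group if nonempty
def pvFin (st : List (List String) × List String) : List (List String) :=
  if st.2.length > 0 then st.1 ++ [st.2] else st.1

theorem pvStepA_cont (acc : List (List String) × List String) (t : String)
    (hs : PySem.Str.startswith t "##" = true) :
    pvStepA acc t = (acc.1, acc.2 ++ [t]) := by
  unfold pvStepA
  rw [if_neg (by simpa using hs)]

theorem pvStepA_new (acc : List (List String) × List String) (t : String)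
    (hs : PySem.Str.startswith t "##" = false) :
    pvStepA acc t = ((if acc.2.length > 0 then acc.1 ++ [acc.2] else acc.1), [t]) := by
  unfold pvStepA
  rw [if_pos (by simpa using hs)]

-- A's fold starting from a nonempty open group g: the continuation run extends g, then pvGW resumes
theorem pvFoldA (ts : List String) (out : List (List String)) (g : List String)
    (hg : g ≠ []) :
    pvFin (ts.foldl pvStepA (out, g))
      = out ++ (g ++ ts.takeWhile (fun s => PySem.Str.startswith s "##"))
          :: pvGW (ts.dropWhile (fun s => PySem.Str.startswith s "##")) := by
  induction ts generalizing out g with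
  | nil =>
    have h0 : pvGW [] = ([] : List (List String)) := by rw [pvGW]
    simp [pvFin, List.length_pos_iff.2 hg, h0]
  | cons t r ih =>
    rw [List.foldl_cons, List.takeWhile_cons, List.dropWhile_cons]
    by_cases hs : PySem.Str.startswith t "##" = true
    · rw [pvStepA_cont _ _ hs, ih out (g ++ [t]) (by simp)]
      simp [show PySem.Chars.startswith t.toList ['#', '#'] = true by simpa using hs]
    · have hs' : PySem.Str.startswith t "##" = false := by simpa using hs
      rw [pvStepA_new _ _ hs']
      rw [if_pos (show (0:Nat) < g.length from List.length_pos_iff.2 hg)]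
      rw [ih (out ++ [g]) [t] (by simp)]
      simp [show PySem.Chars.startswith t.toList ['#', '#'] = false by simpa using hs', pvGW]

-- ===== VERDICT (by name: the statement is the Claim_ definition above) =====
theorem group_word_pieces_spec : Claim_equal_group_word_pieces := by
  intro bert_tokens _
  unfold Spec_group_word_pieces group_word_pieces group_word_pieces_alt
  rw [pvGo_eq]
  simp only [List.drop_zero]
  show pvFin (bert_tokens.foldl pvStepA ([], [])) = pvGW bert_tokens
  cases bert_tokens with
  | nil => rw [pvGW]; rfl
  | cons t r =>
    rw [List.foldl_cons, pvGW]
    have hstate : pvStepA (([] : List (List String)), ([] : List String)) t = ([], [t]) := by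
      by_cases hs : PySem.Str.startswith t "##" = true
      · rw [pvStepA_cont _ _ hs]; rfl
      · rw [pvStepA_new _ _ (by simpa using hs)]; simp
    rw [hstate, pvFoldA r [] [t] (by simp)]
    simp
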